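-- pv_equiv track=rewrite | github.com/Joon-hub/Brain_Connectivity_Pipeline | src/features.py | parse_networks
-- ===== SOURCE A (Python) =====
-- from typing import Tuple, Dict, List
--
-- def parse_networks(region_list: List[str]) -> List[str]:
--     """
--     Parse network membership from region names.
--     ...
--     """
--     networks = []
--
--     for region in region_list:
--         name = region.lower()
--         network = 'Unknown'
--
--         # --- Cortical (Schaefer 7 or 17 networks) ---
--         if region.startswith(('LH_', 'RH_')):
--             if 'viscent' in name or 'visperi' in name or 'striate' in name:
--                 network = 'Visual'
--             elif 'sommota' in name or 'sommotb' in name: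
--                 network = 'Somatomotor'
--             elif 'dorsattna' in name or 'dorsattnb' in name:
--                 network = 'DorsalAttention'
--             elif 'salventattna' in name or 'salventattnb' in name:
--                 network = 'SalienceVentralAttention'
--             elif 'limbica' in name or 'limbicb' in name:
--                 network = 'Limbic'
--             elif 'conta' in name or 'contb' in name or 'contc' in name:
--                 network = 'Control'
--             elif 'defaulta' in name or 'defaultb' in name or 'defaultc' in name:
--                 network = 'DefaultMode'
--             elif 'temppar' in name:
--                 network = 'TemporalParietal'
--             else:
--                 network = 'CorticalOther'
--
--         # Subcortical Tian regions
--         else: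
--             if 'hip' in name:
--                 network = 'Hippocampus'
--             elif 'amy' in name:
--                 network = 'Amygdala'
--             elif 'th' in name:
--                 network = 'Thalamus'
--             elif 'nac' in name:
--                 network = 'Accumbens'
--             elif 'put' in name:
--                 network = 'Putamen'
--             elif 'pallid' in name or 'gp' in name:
--                 network = 'Pallidum'
--             elif 'caud' in name:
--                 network = 'Caudate'
--             else:
--                 network = 'SubcorticalOther'
--
--         networks.append(network)
--
--     return networks
-- ===== SOURCE B (Python) =====
-- # Rule-major rewrite: instead of classifying each region by an if/elif chain,
-- # B makes one staged pass PER RULE over the whole list, applying rules in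
-- # reverse priority so earlier (higher-priority) rules overwrite later ones.
--
-- RULES = [
--     # cortical rules (apply only when the region is cortical: flag True)
--     ('viscent', 'Visual', True), ('visperi', 'Visual', True), ('striate', 'Visual', True),
--     ('sommota', 'Somatomotor', True), ('sommotb', 'Somatomotor', True),
--     ('dorsattna', 'DorsalAttention', True), ('dorsattnb', 'DorsalAttention', True),
--     ('salventattna', 'SalienceVentralAttention', True), ('salventattnb', 'SalienceVentralAttention', True),
--     ('limbica', 'Limbic', True), ('limbicb', 'Limbic', True),
--     ('conta', 'Control', True), ('contb', 'Control', True), ('contc', 'Control', True),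
--     ('defaulta', 'DefaultMode', True), ('defaultb', 'DefaultMode', True), ('defaultc', 'DefaultMode', True),
--     ('temppar', 'TemporalParietal', True),
--     # subcortical rules (flag False)
--     ('hip', 'Hippocampus', False), ('amy', 'Amygdala', False), ('th', 'Thalamus', False),
--     ('nac', 'Accumbens', False), ('put', 'Putamen', False),
--     ('pallid', 'Pallidum', False), ('gp', 'Pallidum', False),
--     ('caud', 'Caudate', False),
-- ]
--
--
-- def parse_networks(region_list):
--     names = [r.lower() for r in region_list]
--     cortical = [r.startswith(('LH_', 'RH_')) for r in region_list]
--     out = ['CorticalOther' if c else 'SubcorticalOther' for c in cortical]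
--     for sub, label, want in reversed(RULES):
--         out = [label if (c == want and sub in n) else cur
--                for n, c, cur in zip(names, cortical, out)]
--     return out
-- ===== Notes on version B (the rewrite author's own statement) =====
-- stated objective: alternative
-- what changed: Region-major if/elif first-match chains replaced by a rule-major algorithm: one vectorized pass over the whole list per rule, rules applied in reverse priority so earlier rules overwrite, starting from per-group defaults.
import Mathlib
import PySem

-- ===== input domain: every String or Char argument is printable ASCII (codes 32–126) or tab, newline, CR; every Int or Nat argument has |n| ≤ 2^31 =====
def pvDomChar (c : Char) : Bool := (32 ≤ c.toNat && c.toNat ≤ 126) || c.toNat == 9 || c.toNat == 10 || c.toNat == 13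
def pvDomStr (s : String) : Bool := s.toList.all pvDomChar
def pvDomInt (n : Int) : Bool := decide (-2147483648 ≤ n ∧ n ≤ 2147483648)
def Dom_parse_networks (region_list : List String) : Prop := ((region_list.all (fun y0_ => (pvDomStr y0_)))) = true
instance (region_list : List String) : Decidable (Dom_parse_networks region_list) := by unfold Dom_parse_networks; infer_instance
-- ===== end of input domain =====

-- B replaces A's region-major if/elif chains by a rule-major algorithm: one staged pass
-- over the whole list per rule, rules applied in reverse priority so earlier rules
-- overwrite later ones (objective: alternative). Same return value on every input.

-- ===== PORT A =====
-- literal transliteration of A's per-region if/elif chains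
def pvClassifyA (region : String) : String :=
  let name := PySem.Str.lower region
  if PySem.Str.startswith region "LH_" || PySem.Str.startswith region "RH_" then
    if PySem.Str.isIn "viscent" name || PySem.Str.isIn "visperi" name || PySem.Str.isIn "striate" name then "Visual"
    else if PySem.Str.isIn "sommota" name || PySem.Str.isIn "sommotb" name then "Somatomotor"
    else if PySem.Str.isIn "dorsattna" name || PySem.Str.isIn "dorsattnb" name then "DorsalAttention"
    else if PySem.Str.isIn "salventattna" name || PySem.Str.isIn "salventattnb" name then "SalienceVentralAttention"
    else if PySem.Str.isIn "limbica" name || PySem.Str.isIn "limbicb" name then "Limbic"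
    else if PySem.Str.isIn "conta" name || PySem.Str.isIn "contb" name || PySem.Str.isIn "contc" name then "Control"
    else if PySem.Str.isIn "defaulta" name || PySem.Str.isIn "defaultb" name || PySem.Str.isIn "defaultc" name then "DefaultMode"
    else if PySem.Str.isIn "temppar" name then "TemporalParietal"
    else "CorticalOther"
  else
    if PySem.Str.isIn "hip" name then "Hippocampus"
    else if PySem.Str.isIn "amy" name then "Amygdala"
    else if PySem.Str.isIn "th" name then "Thalamus"
    else if PySem.Str.isIn "nac" name then "Accumbens"
    else if PySem.Str.isIn "put" name then "Putamen"
    else if PySem.Str.isIn "pallid" name || PySem.Str.isIn "gp" name then "Pallidum"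
    else if PySem.Str.isIn "caud" name then "Caudate"
    else "SubcorticalOther"

def parse_networks (region_list : List String) : List String :=
  region_list.foldl (fun networks region => networks ++ [pvClassifyA region]) []

-- ===== PORT B =====
def RULES : List (String × String × Bool) :=
  [("viscent", "Visual", true), ("visperi", "Visual", true), ("striate", "Visual", true),
   ("sommota", "Somatomotor", true), ("sommotb", "Somatomotor", true),
   ("dorsattna", "DorsalAttention", true), ("dorsattnb", "DorsalAttention", true),
   ("salventattna", "SalienceVentralAttention", true), ("salventattnb", "SalienceVentralAttention", true),
   ("limbica", "Limbic", true), ("limbicb", "Limbic", true),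
   ("conta", "Control", true), ("contb", "Control", true), ("contc", "Control", true),
   ("defaulta", "DefaultMode", true), ("defaultb", "DefaultMode", true), ("defaultc", "DefaultMode", true),
   ("temppar", "TemporalParietal", true),
   ("hip", "Hippocampus", false), ("amy", "Amygdala", false), ("th", "Thalamus", false),
   ("nac", "Accumbens", false), ("put", "Putamen", false),
   ("pallid", "Pallidum", false), ("gp", "Pallidum", false),
   ("caud", "Caudate", false)]

-- one staged pass: [label if (c == want and sub in n) else cur for n, c, cur in zip(names, cortical, out)]
def pvPass (sub label : String) (want : Bool) (names : List String) (cort : List Bool) (out : List String) : List String :=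
  (names.zip (cort.zip out)).map (fun p => if (p.2.1 == want) && PySem.Str.isIn sub p.1 then label else p.2.2)

def parse_networks_alt (region_list : List String) : List String :=
  let names := region_list.map PySem.Str.lower
  let cort := region_list.map (fun r => PySem.Str.startswith r "LH_" || PySem.Str.startswith r "RH_")
  let out0 := cort.map (fun c => if c then "CorticalOther" else "SubcorticalOther")
  RULES.reverse.foldl (fun out r => pvPass r.1 r.2.1 r.2.2 names cort out) out0

-- ===== PRECONDITION & SPEC =====
def Spec_parse_networks (region_list : List String) (out : List String) : Prop := out = parse_networks_alt region_list
instance (region_list : List String) (out : List String) : Decidable (Spec_parse_networks region_list out) := by unfold Spec_parse_networks; infer_instance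

-- ===== CLAIM (what is proved, stated in full; the proofs are below) =====
def Claim_equal_parse_networks : Prop := ∀ (region_list : List String), Dom_parse_networks region_list → Spec_parse_networks region_list (parse_networks region_list)

-- ===== LEMMAS AND PROOFS =====
theorem pv_ite_or {α : Type} (a b : Bool) (x e : α) :
    (if (a || b) = true then x else e) = if a = true then x else if b = true then x else e := by
  cases a <;> simp

theorem pv_ite_or' {α : Type} (a b : Bool) (x e : α) :
    (if (a = true ∨ b = true) then x else e) = if a = true then x else if b = true then x else e := by
  cases a <;> simp

-- one staged pass over zipped maps acts pointwise
theorem pass_map (sub label : String) (want : Bool) (h : String → Bool) (g : String → String)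
    (rl : List String) :
    pvPass sub label want (rl.map PySem.Str.lower) (rl.map h) (rl.map g)
      = rl.map (fun x => if (h x == want) && PySem.Str.isIn sub (PySem.Str.lower x) then label else g x) := by
  induction rl with
  | nil => rfl
  | cons y ys ih => simp [pvPass] at ih ⊢; exact ih

-- the fold of staged passes acts pointwise
theorem fold_map (rs : List (String × String × Bool)) (h : String → Bool) (g : String → String)
    (rl : List String) :
    rs.foldl (fun out r => pvPass r.1 r.2.1 r.2.2 (rl.map PySem.Str.lower) (rl.map h) out) (rl.map g)
      = rl.map (fun x => rs.foldl
          (fun acc r => if (h x == r.2.2) && PySem.Str.isIn r.1 (PySem.Str.lower x) then r.2.1 else acc)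
          (g x)) := by
  induction rs generalizing g with
  | nil => rfl
  | cons r rs ih =>
      simp only [List.foldl_cons]
      rw [pass_map, ih]

-- per region: the reversed overwrite fold equals A's first-match chain
theorem classify_eq (region : String) :
    pvClassifyA region
      = RULES.reverse.foldl
          (fun acc r =>
            if ((PySem.Str.startswith region "LH_" || PySem.Str.startswith region "RH_") == r.2.2)
                && PySem.Str.isIn r.1 (PySem.Str.lower region) then r.2.1 else acc)
          (if (PySem.Str.startswith region "LH_" || PySem.Str.startswith region "RH_") then "CorticalOther"
           else "SubcorticalOther") := by
  unfold pvClassifyA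
  by_cases hc : (PySem.Str.startswith region "LH_" || PySem.Str.startswith region "RH_") = true
  · simp only [hc, if_true, RULES, List.reverse_cons, List.reverse_nil, List.nil_append,
      List.cons_append, List.foldl_cons, List.foldl_nil, pv_ite_or]
    simp
  · simp only [Bool.not_eq_true] at hc
    simp only [hc, Bool.false_eq_true, if_false, RULES, List.reverse_cons, List.reverse_nil,
      List.nil_append, List.cons_append, List.foldl_cons, List.foldl_nil]
    simp [pv_ite_or']

theorem foldl_append_eq_map (f : String → String) (l : List String) (acc : List String) :
    l.foldl (fun networks region => networks ++ [f region]) acc = acc ++ l.map f := by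
  induction l generalizing acc with
  | nil => simp
  | cons x xs ih => simp [List.foldl, ih]

-- ===== VERDICT (by name: the statement is the Claim_ definition above) =====
theorem parse_networks_spec : Claim_equal_parse_networks := by
  intro region_list _
  unfold Spec_parse_networks parse_networks parse_networks_alt
  rw [foldl_append_eq_map]
  simp only [List.nil_append]
  rw [show (region_list.map (fun r => PySem.Str.startswith r "LH_" || PySem.Str.startswith r "RH_")).map
        (fun c => if c then "CorticalOther" else "SubcorticalOther")
      = region_list.map (fun r => if (PySem.Str.startswith r "LH_" || PySem.Str.startswith r "RH_")
          then "CorticalOther" else "SubcorticalOther") from by simp [List.map_map, Function.comp]]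
  rw [fold_map]
  exact List.map_congr_left (fun r _ => classify_eq r)
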